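-- pv_equiv track=rewrite | github.com/campbellhealy/100DaysOfCode | Day 03 -  Control Flow & Logical Operators/love_calculation.py | love_calc
-- ===== SOURCE A (Python) =====
-- def love_calc(name1, name2):
--     true_love = set("truelove")
--     total_score_name1 = 0
--     total_score_name2 = 0
--     for x in true_love:
--         name1_count = name1.count(x)
--         total_score_name1 = total_score_name1 + name1_count
--         name2_count = name2.count(x)
--         total_score_name2 = total_score_name2 + name2_count
--
--     total_score_name1 = total_score_name1 * 10
--     love_score = total_score_name1 + total_score_name2
--     return love_score
-- ===== SOURCE B (Python) =====
-- def love_calc(name1, name2):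
--     s = set("truelove")
--     count1 = 0
--     for c in name1:
--         if c in s:
--             count1 += 1
--     count2 = 0
--     for c in name2:
--         if c in s:
--             count2 += 1
--     return count1 * 10 + count2
-- ===== Notes on version B (the rewrite author's own statement) =====
-- stated objective: simpler
-- what changed: B replaces A's per-letter counting (one .count scan of each name for every letter of the set) with a single character-by-character membership pass over each name, accumulating one counter per name.
import Mathlib
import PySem

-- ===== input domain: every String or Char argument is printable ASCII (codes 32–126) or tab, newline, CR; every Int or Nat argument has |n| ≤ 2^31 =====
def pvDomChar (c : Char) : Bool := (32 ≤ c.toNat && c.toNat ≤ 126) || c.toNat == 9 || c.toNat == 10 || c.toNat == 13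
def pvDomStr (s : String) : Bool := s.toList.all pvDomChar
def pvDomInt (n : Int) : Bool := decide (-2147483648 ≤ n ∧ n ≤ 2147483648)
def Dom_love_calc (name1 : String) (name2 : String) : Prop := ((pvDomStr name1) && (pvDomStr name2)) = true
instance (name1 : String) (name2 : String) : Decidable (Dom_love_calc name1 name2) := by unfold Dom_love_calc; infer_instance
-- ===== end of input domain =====

-- B replaces A's per-letter .count scans (one pass of each name per letter of set("truelove"))
-- with a single membership pass over each name; simpler, same results.


-- ===== PORT A =====
def love_calc (name1 : String) (name2 : String) : Int :=
  let true_love := PySem.Set.ofList "truelove".toList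
  let totals := true_love.foldl (fun (acc : Int × Int) x =>
      let name1_count : Int := PySem.List.count name1.toList x
      let name2_count : Int := PySem.List.count name2.toList x
      (acc.1 + name1_count, acc.2 + name2_count)) ((0 : Int), (0 : Int))
  let total_score_name1 := totals.1 * 10
  let love_score := total_score_name1 + totals.2
  love_score

-- ===== PORT B =====
def love_calc_alt (name1 : String) (name2 : String) : Int :=
  let s := PySem.Set.ofList "truelove".toList
  let count1 := name1.toList.foldl (fun (acc : Int) c => if c ∈ s then acc + 1 else acc) 0
  let count2 := name2.toList.foldl (fun (acc : Int) c => if c ∈ s then acc + 1 else acc) 0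
  count1 * 10 + count2

-- ===== PRECONDITION & SPEC =====
def Spec_love_calc (name1 : String) (name2 : String) (out : Int) : Prop := out = love_calc_alt name1 name2
instance (name1 : String) (name2 : String) (out : Int) : Decidable (Spec_love_calc name1 name2 out) := by unfold Spec_love_calc; infer_instance

-- ===== CLAIM (what is proved, stated in full; the proofs are below) =====
def Claim_equal_love_calc : Prop := ∀ (name1 : String) (name2 : String), Dom_love_calc name1 name2 → Spec_love_calc name1 name2 (love_calc name1 name2)

-- ===== LEMMAS AND PROOFS =====

-- the concrete set of letters
theorem pv_letters : PySem.Set.ofList "truelove".toList = ['t', 'r', 'u', 'e', 'l', 'o', 'v'] := by decide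

-- A's per-letter count sum equals B's single-pass membership count, for one name
theorem pv_sum_counts (cs : List Char) :
    ((cs.count 't' : Int) + cs.count 'r' + cs.count 'u' + cs.count 'e'
      + cs.count 'l' + cs.count 'o' + cs.count 'v')
    = (cs.countP (fun c => decide (c ∈ (['t', 'r', 'u', 'e', 'l', 'o', 'v'] : List Char))) : Int) := by
  induction cs with
  | nil => simp
  | cons c cs ih =>
    simp only [List.count_cons, List.countP_cons, List.mem_cons, List.not_mem_nil, or_false]
    push_cast
    by_cases h1 : c = 't' <;> by_cases h2 : c = 'r' <;> by_cases h3 : c = 'u' <;>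
      by_cases h4 : c = 'e' <;> by_cases h5 : c = 'l' <;> by_cases h6 : c = 'o' <;>
      by_cases h7 : c = 'v' <;> simp_all <;> omega

-- B's loop over one name computes countP
theorem pv_b_pass (cs : List Char) :
    cs.foldl (fun (acc : Int) c => if c ∈ (['t', 'r', 'u', 'e', 'l', 'o', 'v'] : List Char) then acc + 1 else acc) 0
    = (cs.countP (fun c => decide (c ∈ (['t', 'r', 'u', 'e', 'l', 'o', 'v'] : List Char))) : Int) := by
  simpa using PySem.List.foldl_ite_add_one
    (fun c => c ∈ (['t', 'r', 'u', 'e', 'l', 'o', 'v'] : List Char)) cs 0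

-- ===== VERDICT (by name: the statement is the Claim_ definition above) =====
theorem love_calc_spec : Claim_equal_love_calc := by
  intro name1 name2 _
  unfold Spec_love_calc love_calc love_calc_alt
  rw [pv_letters]
  simp only [List.foldl]
  rw [pv_b_pass, pv_b_pass, ← pv_sum_counts, ← pv_sum_counts]
  simp [PySem.List.count]
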